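-- pv_equiv track=rewrite | github.com/yeseul0722/Algorithm | 프로그래머스/2/77885. 2개 이하로 다른 비트/2개 이하로 다른 비트.py | solution
-- ===== SOURCE A (Python) =====
-- def solution(numbers):
--     answer = []
--
--     for n in numbers:
--         bin_num = '0' + bin(n)[2:]
--         idx = bin_num.rfind('0')
--         bin_lst = list(bin_num)
--         bin_lst[idx] = '1'
--
--         if n % 2 == 1:
--             bin_lst[idx + 1] = '0'
--
--         answer.append(int(''.join(bin_lst), 2))
--
--     return answer
-- ===== SOURCE B (Python) =====
-- def solution(numbers):
--     # arithmetic re-implementation: no binary strings.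
--     # even n: answer is n+1.  odd n: find 2^t (t = number of trailing one bits)
--     # by halving; answer sets the lowest zero bit and clears the bit below it.
--     def bump(n):
--         if n % 2 == 0:
--             return n + 1
--         step = 1
--         m = n
--         while m % 2 == 1:
--             m //= 2
--             step *= 2
--         return n + step - step // 2
--     return [bump(n) for n in numbers]
-- ===== Notes on version B (the rewrite author's own statement) =====
-- stated objective: alternative
-- what changed: Replaced A's build-a-binary-string / rfind / mutate-list / reparse pipeline by pure integer arithmetic: even n maps to n+1, odd n adds 2^t - 2^(t-1) where 2^t (t = trailing one bits) comes from a halving loop.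
-- outside the precondition, e.g. on solution([-2]): A returns [3], B returns [-1]; on solution([-5]): A returns [6], B returns [-3]; on solution([-1]): A returns [5], B does not finish within the time limit
import Mathlib
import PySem

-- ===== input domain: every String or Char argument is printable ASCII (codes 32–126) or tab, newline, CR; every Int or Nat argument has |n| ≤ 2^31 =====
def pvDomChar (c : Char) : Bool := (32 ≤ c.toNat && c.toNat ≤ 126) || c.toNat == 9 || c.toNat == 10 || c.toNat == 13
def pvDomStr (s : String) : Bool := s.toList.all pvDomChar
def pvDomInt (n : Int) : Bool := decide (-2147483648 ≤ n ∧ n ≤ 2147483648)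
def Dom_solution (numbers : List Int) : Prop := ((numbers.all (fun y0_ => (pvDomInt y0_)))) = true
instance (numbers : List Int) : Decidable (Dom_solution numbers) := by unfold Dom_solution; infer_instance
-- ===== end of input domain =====

-- B replaces A's binary-string build/rfind/mutate/reparse per element by pure integer
-- arithmetic (halving loop for the trailing-ones block): no string building or scanning.


-- ===== PORT A =====
-- bin(n)[2:] for n ≥ 1, digit by digit (MSB first), exactly Python's repeated-halving digits
def pvBinChars (n : Nat) : List Char :=
  if h : n = 0 then [] else pvBinChars (n / 2) ++ [if n % 2 = 1 then '1' else '0']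
decreasing_by exact Nat.div_lt_self (Nat.pos_of_ne_zero h) one_lt_two

-- bin(n)[2:] (Python prints '0' for n = 0)
def pvPyBin (n : Nat) : List Char := if n = 0 then ['0'] else pvBinChars n

-- s.rfind('0'): highest index holding '0', or -1
def pvRfind0 (l : List Char) : Int :=
  match l.reverse.findIdx? (· == '0') with
  | some i => (l.length : Int) - 1 - (i : Int)
  | none => -1

-- int(''.join(bin_lst), 2): all chars here are '0'/'1'
def pvParseBin (l : List Char) : Int :=
  l.foldl (fun a c => 2 * a + (if c = '1' then 1 else 0)) 0

-- one loop body of A; n.toNat is exact on Pre_ (n ≥ 0): for n < 0 Python's bin yields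
-- '-0b…' and A's behaviour is the accidental '0b'-prefix parse excluded by Pre_.
def pvFlipA (n : Int) : Int :=
  let bin_num : List Char := '0' :: pvPyBin n.toNat
  let idx : Int := pvRfind0 bin_num
  let bin_lst := bin_num.set idx.toNat '1'   -- idx ≥ 0 always: bin_num starts with '0'
  let bin_lst := if n % 2 = 1 then bin_lst.set (idx.toNat + 1) '0' else bin_lst
  pvParseBin bin_lst

def solution (numbers : List Int) : List Int :=
  numbers.foldl (fun answer n => answer ++ [pvFlipA n]) []

-- ===== PORT B =====
-- the while-loop of Source B; m is the (nonnegative on Pre_) halved value, step doubles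
def pvLowLoop (m : Nat) (step : Int) : Int :=
  if h : m % 2 = 1 then pvLowLoop (m / 2) (step * 2) else step
decreasing_by exact Nat.div_lt_self (by omega) one_lt_two

def pvBump (n : Int) : Int :=
  if n % 2 = 0 then n + 1
  else
    let step := pvLowLoop n.toNat 1   -- m := n; exact on Pre_ (n ≥ 0)
    n + step - PySem.Int.floordiv step 2

def solution_alt (numbers : List Int) : List Int := numbers.map pvBump

-- ===== PRECONDITION & SPEC =====
-- Pre_ excludes lists with a negative element: there Python's bin(n) is '-0b…', A's
-- flip-and-reparse runs on the literal '0b' prefix and returns accidental values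
-- (see the cited examples) that no re-implementation should match, and B's halving
-- loop itself does not terminate on -1.
def Pre_solution (numbers : List Int) : Prop := ∀ n ∈ numbers, 0 ≤ n
instance (numbers : List Int) : Decidable (Pre_solution numbers) := by
  unfold Pre_solution; infer_instance

def pvWitness_solution : List Int := [0, 1, 2, 3, 7, 8, 12, 1023]

def Spec_solution (numbers : List Int) (out : List Int) : Prop := out = solution_alt numbers
instance (numbers : List Int) (out : List Int) : Decidable (Spec_solution numbers out) := by
  unfold Spec_solution; infer_instance

-- ===== CLAIM (what is proved, stated in full; the proofs are below) =====
def Claim_equal_solution : Prop :=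
  ∀ (numbers : List Int), Dom_solution numbers → Pre_solution numbers →
    Spec_solution numbers (solution numbers)

-- ===== LEMMAS AND PROOFS =====

-- foldl of the parser from an arbitrary accumulator
theorem pvParse_foldl (l : List Char) (a : Int) :
    l.foldl (fun a c => 2 * a + (if c = '1' then 1 else 0)) a
      = a * 2 ^ l.length + pvParseBin l := by
  induction l generalizing a with
  | nil => simp [pvParseBin]
  | cons c l ih =>
    simp only [List.foldl_cons, pvParseBin, List.length_cons]
    rw [ih, ih (2 * 0 + _)]
    ring

theorem pvParse_append (p q : List Char) :
    pvParseBin (p ++ q) = pvParseBin p * 2 ^ q.length + pvParseBin q := by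
  simp only [pvParseBin, List.foldl_append]
  rw [pvParse_foldl]
  rfl

theorem pvParse_cons0 (l : List Char) : pvParseBin ('0' :: l) = pvParseBin l := by
  simp [pvParseBin, List.foldl_cons]

theorem pvParse_binChars (m : Nat) : pvParseBin (pvBinChars m) = m := by
  induction m using Nat.strong_induction_on with
  | _ m ih =>
    rw [pvBinChars]
    by_cases h : m = 0
    · simp [h, pvParseBin]
    · simp only [h, dite_false]
      rw [pvParse_append, ih (m / 2) (Nat.div_lt_self (Nat.pos_of_ne_zero h) one_lt_two)]
      have h2 : m % 2 = 0 ∨ m % 2 = 1 := by omega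
      rcases h2 with h2 | h2 <;> simp [h2, pvParseBin] <;> omega

theorem pvParse_replicate1 (t : Nat) :
    pvParseBin (List.replicate t '1') = 2 ^ t - 1 := by
  induction t with
  | zero => simp [pvParseBin]
  | succ t ih =>
    rw [List.replicate_succ', pvParse_append, ih]
    simp [pvParseBin]
    ring

-- S1: digits of q*2^t + 2^t - 1 (stated as m+1 = (q+1)*2^t), q even
theorem pvBinChars_ones (t : Nat) : ∀ (m q : Nat), q % 2 = 0 → m + 1 = (q + 1) * 2 ^ t →
    pvBinChars m = pvBinChars q ++ List.replicate t '1' := by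
  induction t with
  | zero => intro m q _ hm; simp at hm; simp [hm]
  | succ t ih =>
    intro m q hq hm
    have hp : 1 ≤ 2 ^ t := Nat.one_le_two_pow
    have hpow : 2 ^ (t + 1) = 2 ^ t * 2 := by ring
    rw [hpow] at hm
    have hm0 : m ≠ 0 := by nlinarith
    rw [show (q + 1) * (2 ^ t * 2) = ((q + 1) * 2 ^ t) * 2 by ring] at hm
    have hodd : m % 2 = 1 := by omega
    rw [pvBinChars]
    simp only [hm0, dite_false, hodd]
    have hdiv : m / 2 + 1 = (q + 1) * 2 ^ t := by omega
    rw [ih (m / 2) q hq hdiv, List.replicate_succ', List.append_assoc]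
    simp

-- the halving loop computes 2^t · step on q*2^t + 2^t - 1, q even
theorem pvLowLoop_eq (t : Nat) : ∀ (m q : Nat) (s : Int), q % 2 = 0 →
    m + 1 = (q + 1) * 2 ^ t → pvLowLoop m s = s * 2 ^ t := by
  induction t with
  | zero =>
    intro m q s hq hm
    simp at hm
    rw [pvLowLoop]
    simp [hm, Nat.add_mod, hq]
  | succ t ih =>
    intro m q s hq hm
    have hp : 1 ≤ 2 ^ t := Nat.one_le_two_pow
    have hpow : 2 ^ (t + 1) = 2 ^ t * 2 := by ring
    rw [hpow] at hm
    have hm0 : m ≠ 0 := by nlinarith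
    rw [show (q + 1) * (2 ^ t * 2) = ((q + 1) * 2 ^ t) * 2 by ring] at hm
    have hodd : m % 2 = 1 := by omega
    rw [pvLowLoop]
    simp only [hodd, dite_true]
    rw [ih (m / 2) q (s * 2) hq (by omega)]
    ring

-- every m decomposes as q*2^t + 2^t - 1 with q even, t matching m's parity
theorem pvDecomp (m : Nat) : ∃ q t, q % 2 = 0 ∧ m + 1 = (q + 1) * 2 ^ t ∧
    (m % 2 = 1 → 1 ≤ t) ∧ (m % 2 = 0 → t = 0) := by
  induction m using Nat.strong_induction_on with
  | _ m ih =>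
    by_cases he : m % 2 = 0
    · exact ⟨m, 0, he, by ring, by omega, fun _ => rfl⟩
    · have hodd : m % 2 = 1 := by omega
      obtain ⟨q, t, hq, hm, _, _⟩ := ih (m / 2) (Nat.div_lt_self (by omega) one_lt_two)
      refine ⟨q, t + 1, hq, ?_, fun _ => by omega, fun h => by omega⟩
      rw [show (q + 1) * 2 ^ (t + 1) = ((q + 1) * 2 ^ t) * 2 by ring]
      omega

-- rfind('0') on P ++ '0' :: replicate t '1' hits position |P|
theorem pvFindIdx_rep (t : Nat) (x : List Char) :
    List.findIdx? (· == '0') (List.replicate t '1' ++ '0' :: x) = some t := by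
  induction t with
  | zero => simp [List.findIdx?_cons]
  | succ t ih => rw [List.replicate_succ, List.cons_append, List.findIdx?_cons]; simp [ih]

theorem pvRfind0_eq (P : List Char) (t : Nat) :
    pvRfind0 (P ++ '0' :: List.replicate t '1') = (P.length : Int) := by
  unfold pvRfind0
  rw [List.reverse_append, List.reverse_cons, List.append_assoc,
    List.reverse_replicate, List.singleton_append, pvFindIdx_rep]
  simp
  push_cast
  ring

theorem pvSet_len (P : List Char) (c x : Char) (R : List Char) :
    (P ++ c :: R).set P.length x = P ++ x :: R := by
  induction P with
  | nil => simp
  | cons a P ih => simp [List.set, ih]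

-- master decomposition of A's padded binary string
theorem pvBinDecomp (m q t : Nat) (hq : q % 2 = 0) (hm : m + 1 = (q + 1) * 2 ^ t) :
    ∃ P : List Char, ('0' :: pvPyBin m = P ++ '0' :: List.replicate t '1') ∧
      pvParseBin P * 2 ^ (t + 1) = (q : Int) * 2 ^ t := by
  by_cases hq0 : q = 0
  · subst hq0
    by_cases ht : t = 0
    · subst ht
      simp at hm
      refine ⟨['0'], ?_, by simp [pvParseBin]⟩
      simp [hm, pvPyBin]
    · have hp : 1 ≤ 2 ^ t := Nat.one_le_two_pow
      have hm0 : m ≠ 0 := by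
        have : 2 ≤ 2 ^ t := by
          calc 2 = 2 ^ 1 := rfl
          _ ≤ 2 ^ t := Nat.pow_le_pow_right (by norm_num) (by omega)
        omega
      refine ⟨[], ?_, by simp [pvParseBin]⟩
      simp only [pvPyBin, hm0, if_false, List.nil_append]
      rw [pvBinChars_ones t m 0 rfl (by omega)]
      simp [pvBinChars]
  · have hp : 1 ≤ 2 ^ t := Nat.one_le_two_pow
    have hm0 : m ≠ 0 := by
      have h2 : 2 * 2 ^ t ≤ (q + 1) * 2 ^ t := Nat.mul_le_mul_right _ (by omega)
      omega
    have hq1 : q ≠ 0 := hq0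
    refine ⟨'0' :: pvBinChars (q / 2), ?_, ?_⟩
    · simp only [pvPyBin, hm0, if_false]
      rw [pvBinChars_ones t m q hq hm]
      rw [pvBinChars]
      simp only [hq1, dite_false, hq, if_neg (by omega)]
      simp
    · rw [pvParse_cons0, pvParse_binChars]
      have h2 : (2:Int) ^ (t + 1) = 2 ^ t * 2 := by ring
      rw [h2]
      have h3 : ((q / 2 : Nat) : Int) * 2 = (q : Int) := by omega
      rw [← mul_assoc, mul_comm ((q/2 : Nat) : Int) ((2:Int)^t), mul_assoc, h3, mul_comm]

-- per-element equality on n ≥ 0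
theorem pvFlip_eq_bump (n : Int) (hn : 0 ≤ n) : pvFlipA n = pvBump n := by
  obtain ⟨m, rfl⟩ : ∃ m : Nat, n = (m : Int) := ⟨n.toNat, (Int.toNat_of_nonneg hn).symm⟩
  obtain ⟨q, t, hq, hm, ht1, ht0⟩ := pvDecomp m
  obtain ⟨P, hP, hu⟩ := pvBinDecomp m q t hq hm
  have hmod : (m : Int) % 2 = ((m % 2 : Nat) : Int) := by omega
  have htoNat : (m : Int).toNat = m := Int.toNat_natCast m
  have hparity : m % 2 = 0 ∨ m % 2 = 1 := by omega
  unfold pvFlipA pvBump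
  simp only [htoNat, hP]
  rw [pvRfind0_eq]
  simp only [Int.toNat_natCast]
  rcases hparity with hpar | hpar
  · -- even: t = 0
    have ht : t = 0 := ht0 hpar
    subst ht
    have hne : ¬ ((m : Int) % 2 = 1) := by omega
    have heq : (m : Int) % 2 = 0 := by omega
    rw [if_neg hne, if_pos heq, pvSet_len]
    simp only [List.replicate_zero]
    rw [pvParse_append]
    have hPm : pvParseBin P * 2 = (q : Int) := by
      have h := hu; norm_num at h; linarith
    have hmq : (m : Int) = (q : Int) := by
      simp only [pow_zero, mul_one] at hm; omega
    have h1 : pvParseBin ['1'] = 1 := by decide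
    simp only [List.length_cons, List.length_nil, pow_one, h1]
    linarith
  · -- odd: t ≥ 1
    have ht : 1 ≤ t := ht1 hpar
    obtain ⟨t', rfl⟩ : ∃ t', t = t' + 1 := ⟨t - 1, by omega⟩
    have hyes : ((m : Int) % 2 = 1) := by omega
    have hne : ¬ ((m : Int) % 2 = 0) := by omega
    rw [if_pos hyes, if_neg hne, pvSet_len, List.replicate_succ]
    have hre : P ++ '1' :: '1' :: List.replicate t' '1'
        = (P ++ ['1']) ++ '1' :: List.replicate t' '1' := by simp
    rw [hre]
    have hlen : (P ++ ['1']).length = P.length + 1 := by simp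
    rw [← hlen, pvSet_len, List.append_assoc]
    simp only [List.cons_append, List.nil_append]
    rw [pvParse_append]
    have hloop : pvLowLoop m 1 = 2 ^ (t' + 1) := by
      rw [pvLowLoop_eq (t' + 1) m q 1 hq hm]; ring
    rw [hloop]
    have hfd : PySem.Int.floordiv ((2:Int) ^ (t' + 1)) 2 = 2 ^ t' := by
      rw [PySem.Int.floordiv_eq_ediv_of_pos (by omega), pow_succ]
      omega
    rw [hfd]
    have hrest : pvParseBin ('1' :: '0' :: List.replicate t' '1')
        = 2 ^ (t' + 1) + 2 ^ t' - 1 := by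
      have : ('1' :: '0' :: List.replicate t' '1')
          = ['1', '0'] ++ List.replicate t' '1' := by simp
      rw [this, pvParse_append, pvParse_replicate1]
      simp [pvParseBin]
      ring
    rw [hrest]
    -- value of m from the decomposition
    have hmint : (m : Int) + 1 = ((q : Int) + 1) * 2 ^ (t' + 1) := by
      exact_mod_cast hm
    have hu2 : pvParseBin P * 2 ^ (t' + 2) = (q : Int) * 2 ^ (t' + 1) := hu
    have hpt : (2:Int) ^ (t' + 2) = 2 ^ (t' + 1) * 2 := by ring
    have hpt2 : (2:Int) ^ (t' + 1) = 2 ^ t' * 2 := by ring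
    have hlen2 : ('1' :: '0' :: List.replicate t' '1').length = t' + 2 := by simp
    rw [hlen2]
    have hu2 : pvParseBin P * 2 ^ (t' + 2) = (q : Int) * 2 ^ (t' + 1) := hu
    nlinarith [hu2, hmint]

-- fold of A's loop is the map of B's per-element function on Pre_
theorem pvFold_map (L : List Int) (h : ∀ n ∈ L, 0 ≤ n) : ∀ acc : List Int,
    L.foldl (fun answer n => answer ++ [pvFlipA n]) acc = acc ++ L.map pvBump := by
  induction L with
  | nil => simp
  | cons a L ih =>
    intro acc
    simp only [List.foldl_cons, List.map_cons]
    rw [ih (fun n hn => h n (List.mem_cons_of_mem a hn)),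
      pvFlip_eq_bump a (h a (List.mem_cons_self ..))]
    simp

-- ===== VERDICT (by name: the statement is the Claim_ definition above) =====
theorem solution_spec : Claim_equal_solution := by
  intro numbers _ hpre
  unfold Spec_solution solution solution_alt
  rw [pvFold_map numbers hpre []]
  simp
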